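-- pv_equiv track=rewrite | github.com/jasoncao11/nlp-notebook | 3-1.Bert-MRC/demo_eval.py | mrc_decode
-- ===== SOURCE A (Python) =====
-- def mrc_decode(start_pred, end_pred, raw_text):
--     predict_entities = []
--     for i, s_type in enumerate(start_pred):
--         if s_type == 0:
--             continue
--         for j, e_type in enumerate(end_pred[i:]):
--             if s_type == e_type:
--                 tmp_ent = raw_text[i:i+j+1]
--                 predict_entities.append(tmp_ent)
--                 break
--     return predict_entities
-- ===== SOURCE B (Python) =====
-- def mrc_decode(start_pred, end_pred, raw_text):
--     # One reverse pass: nxt maps each end type to the nearest end index >= i.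
--     nxt = {}
--     res = []
--     i = max(len(start_pred), len(end_pred))
--     while i > 0:
--         i -= 1
--         if i < len(end_pred):
--             nxt[end_pred[i]] = i
--         if i < len(start_pred):
--             t = start_pred[i]
--             if t != 0 and t in nxt:
--                 res.append(raw_text[i:nxt[t] + 1])
--     res.reverse()
--     return res
-- ===== Notes on version B (the rewrite author's own statement) =====
-- stated objective: faster
-- what changed: A rescans end_pred[i:] for every non-zero start tag; B makes a single reverse pass over the indices, maintaining a dict mapping each end type to its nearest end index >= i, so the inner scan disappears.
import Mathlib
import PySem

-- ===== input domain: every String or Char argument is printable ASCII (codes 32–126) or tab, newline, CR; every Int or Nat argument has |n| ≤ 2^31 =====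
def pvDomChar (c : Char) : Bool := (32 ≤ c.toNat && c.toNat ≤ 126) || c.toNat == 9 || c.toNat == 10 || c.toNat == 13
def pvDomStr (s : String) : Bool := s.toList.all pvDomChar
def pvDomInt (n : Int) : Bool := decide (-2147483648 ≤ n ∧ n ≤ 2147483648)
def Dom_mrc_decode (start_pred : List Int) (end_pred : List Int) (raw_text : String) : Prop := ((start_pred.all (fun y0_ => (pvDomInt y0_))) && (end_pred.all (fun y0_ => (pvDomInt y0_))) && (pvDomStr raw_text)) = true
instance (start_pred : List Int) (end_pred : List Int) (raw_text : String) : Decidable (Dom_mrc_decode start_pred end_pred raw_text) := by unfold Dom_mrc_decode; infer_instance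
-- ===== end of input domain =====

-- B replaces A's rescans of end_pred (one scan per start tag) with a single reverse pass
-- keeping a dict 'end type → nearest end index ≥ i' (objective: faster).

-- ===== PORT A =====
-- inner loop 'for j, e_type in enumerate(end_pred[i:]): if s_type == e_type: … break':
-- first position (counted from start value j) whose element equals t
def pvFirstIdx (t : Int) : List Int → Int → Option Int
  | [], _ => none
  | e :: rest, j => if t == e then some j else pvFirstIdx t rest (j + 1)

def mrc_decode (start_pred : List Int) (end_pred : List Int) (raw_text : String) : List String :=
  (PySem.List.enumerate start_pred).foldl (fun (acc : List String) (p : Int × Int) =>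
    if p.2 == 0 then acc
    else
      match pvFirstIdx p.2 (PySem.List.slice end_pred (some p.1) none) 0 with
      | none => acc
      | some j => acc ++ [PySem.Str.slice raw_text (some p.1) (some (p.1 + j + 1))]) []

-- ===== PORT B =====
-- the 'while i > 0: i -= 1; …' loop of Source B; state = (nxt, res)
def pvAltLoop (start_pred : List Int) (end_pred : List Int) (raw_text : String) :
    Nat → PySem.Dict Int Int → List String → PySem.Dict Int Int × List String
  | 0, nxt, res => (nxt, res)
  | i + 1, nxt, res =>
    let nxt' := if i < end_pred.length then nxt.insert (PySem.List.pyGetD end_pred (i : Int) 0) (i : Int) else nxt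
    let res' :=
      if i < start_pred.length then
        let t := PySem.List.pyGetD start_pred (i : Int) 0
        if !(t == 0) && nxt'.contains t then
          res ++ [PySem.Str.slice raw_text (some (i : Int)) (some (nxt'.getD t 0 + 1))]
        else res
      else res
    pvAltLoop start_pred end_pred raw_text i nxt' res'

def mrc_decode_alt (start_pred : List Int) (end_pred : List Int) (raw_text : String) : List String :=
  ((pvAltLoop start_pred end_pred raw_text (max start_pred.length end_pred.length) PySem.Dict.empty []).2).reverse

-- ===== PRECONDITION & SPEC =====
def Spec_mrc_decode (start_pred : List Int) (end_pred : List Int) (raw_text : String) (out : List String) : Prop := out = mrc_decode_alt start_pred end_pred raw_text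
instance (start_pred : List Int) (end_pred : List Int) (raw_text : String) (out : List String) : Decidable (Spec_mrc_decode start_pred end_pred raw_text out) := by unfold Spec_mrc_decode; infer_instance

-- ===== CLAIM (what is proved, stated in full; the proofs are below) =====
def Claim_equal_mrc_decode : Prop := ∀ (start_pred : List Int) (end_pred : List Int) (raw_text : String), Dom_mrc_decode start_pred end_pred raw_text → Spec_mrc_decode start_pred end_pred raw_text (mrc_decode start_pred end_pred raw_text)

-- ===== LEMMAS AND PROOFS =====

-- the common characterisation: the entity contributed at absolute start index i with start type t
def pvCEntry (end_pred : List Int) (raw_text : String) (i : Nat) (t : Int) : Option String :=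
  if t = 0 then none
  else ((end_pred.drop i).findIdx? (fun e => e == t)).map
        (fun n => PySem.Str.slice raw_text (some (i : Int)) (some ((i : Int) + (n : Int) + 1)))

lemma pvFirstIdx_eq (t : Int) (l : List Int) : ∀ (j : Int),
    pvFirstIdx t l j = (l.findIdx? (fun e => e == t)).map (fun n => j + (n : Int)) := by
  induction l with
  | nil => intro j; simp [pvFirstIdx]
  | cons e rest ih =>
    intro j
    rw [List.findIdx?_cons]
    by_cases h : e = t
    · simp [pvFirstIdx, h]
    · have ht : (t == e) = false := by simp [Ne.symm h]
      have he : (e == t) = false := by simp [h]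
      rw [pvFirstIdx, ht]
      simp only [Bool.false_eq_true, if_false, ih, he]
      cases hf : rest.findIdx? (fun e => e == t) with
      | none => simp
      | some n => simp; ring

lemma pvA_fold (end_pred : List Int) (raw_text : String) :
    ∀ (l : List Int) (s : Nat) (acc : List String),
      (PySem.List.enumerate l (s : Int)).foldl (fun (acc : List String) (p : Int × Int) =>
          if p.2 == 0 then acc
          else
            match pvFirstIdx p.2 (PySem.List.slice end_pred (some p.1) none) 0 with
            | none => acc
            | some j => acc ++ [PySem.Str.slice raw_text (some p.1) (some (p.1 + j + 1))]) acc
      = acc ++ (List.range l.length).filterMap (fun k => pvCEntry end_pred raw_text (s + k) (l.getD k 0)) := by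
  intro l
  induction l with
  | nil => intro s acc; simp [PySem.List.enumerate_nil]
  | cons x rest ih =>
    intro s acc
    rw [PySem.List.enumerate_cons, List.foldl_cons]
    have hs1 : ((s : Int) + 1) = ((s + 1 : Nat) : Int) := by push_cast; ring
    rw [hs1, ih (s + 1)]
    have hcomp : ((fun k => pvCEntry end_pred raw_text (s + k) ((x :: rest).getD k 0)) ∘ Nat.succ)
        = (fun k => pvCEntry end_pred raw_text (s + 1 + k) (rest.getD k 0)) := by
      funext k
      simp only [Function.comp, Nat.succ_eq_add_one, List.getD_cons_succ]
      rw [show s + (k + 1) = s + 1 + k by omega]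
    have hrange : (List.range (rest.length + 1)).filterMap
          (fun k => pvCEntry end_pred raw_text (s + k) ((x :: rest).getD k 0))
        = (pvCEntry end_pred raw_text s x).toList ++
          (List.range rest.length).filterMap (fun k => pvCEntry end_pred raw_text (s + 1 + k) (rest.getD k 0)) := by
      rw [List.range_succ_eq_map, List.filterMap_cons, List.filterMap_map, hcomp]
      cases h : pvCEntry end_pred raw_text (s + 0) ((x :: rest).getD 0 0) with
      | none =>
        have : pvCEntry end_pred raw_text s x = none := by
          simpa [List.getD_cons_zero] using h
        simp [this]
      | some v =>
        have : pvCEntry end_pred raw_text s x = some v := by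
          simpa [List.getD_cons_zero] using h
        simp [this]
    rw [List.length_cons, hrange]
    by_cases hx : x = 0
    · simp [hx, pvCEntry]
    · have hxb : ((x : Int) == 0) = false := by simp [hx]
      simp only [hxb, Bool.false_eq_true, if_false]
      rw [PySem.List.slice_from_natCast, pvFirstIdx_eq]
      unfold pvCEntry
      rw [if_neg hx]
      cases hf : (end_pred.drop s).findIdx? (fun e => e == x) with
      | none => simp
      | some n => simp

-- A equals the characterisation
lemma pvA_eq (start_pred end_pred : List Int) (raw_text : String) :
    mrc_decode start_pred end_pred raw_text
      = (List.range start_pred.length).filterMap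
          (fun k => pvCEntry end_pred raw_text k (start_pred.getD k 0)) := by
  unfold mrc_decode
  have := pvA_fold end_pred raw_text start_pred 0 []
  simpa using this

-- invariant of B's dict after the loop has processed all indices ≥ i
def pvInv (end_pred : List Int) (nxt : PySem.Dict Int Int) (i : Nat) : Prop :=
  ∀ t : Int, nxt.get? t = ((end_pred.drop i).findIdx? (fun e => e == t)).map (fun n => ((i : Int) + (n : Int)))

lemma pvInv_top (end_pred : List Int) (i : Nat) (h : end_pred.length ≤ i) :
    pvInv end_pred PySem.Dict.empty i := by
  intro t
  rw [List.drop_eq_nil_of_le h]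
  simp [PySem.Dict.get?_empty]

lemma pvInv_step_in (end_pred : List Int) (nxt : PySem.Dict Int Int) (i : Nat)
    (hi : i < end_pred.length) (h : pvInv end_pred nxt (i + 1)) :
    pvInv end_pred (nxt.insert (PySem.List.pyGetD end_pred (i : Int) 0) (i : Int)) i := by
  intro t
  have hkey : PySem.List.pyGetD end_pred (i : Int) 0 = end_pred[i] := by
    rw [PySem.List.pyGetD_natCast]; exact List.getD_eq_getElem end_pred 0 hi
  rw [hkey, List.drop_eq_getElem_cons hi, List.findIdx?_cons, PySem.Dict.get?_insert]
  by_cases he : end_pred[i] = t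
  · rw [if_pos he.symm]
    have : (end_pred[i] == t) = true := by simp [he]
    rw [this]
    simp
  · rw [if_neg (fun hh => he hh.symm), h t]
    have : (end_pred[i] == t) = false := by simp [he]
    rw [this]
    simp only [Bool.false_eq_true, if_false]
    cases hf : (end_pred.drop (i + 1)).findIdx? (fun e => e == t) with
    | none => simp
    | some n => simp; ring

lemma pvInv_step_out (end_pred : List Int) (nxt : PySem.Dict Int Int) (i : Nat)
    (hi : end_pred.length ≤ i) (h : pvInv end_pred nxt (i + 1)) : pvInv end_pred nxt i := by
  intro t
  rw [h t, List.drop_eq_nil_of_le hi, List.drop_eq_nil_of_le (by omega)]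
  simp

lemma pvRevSucc (f : Nat → Option String) (i : Nat) :
    ((List.range (i + 1)).filterMap f).reverse = (f i).toList ++ ((List.range i).filterMap f).reverse := by
  rw [List.range_succ, List.filterMap_append]
  cases h : f i <;> simp [h]

lemma pvAltLoop_snd (start_pred end_pred : List Int) (raw_text : String) :
    ∀ (i : Nat) (nxt : PySem.Dict Int Int) (res : List String), pvInv end_pred nxt i →
      (pvAltLoop start_pred end_pred raw_text i nxt res).2
        = res ++ ((List.range i).filterMap
            (fun k => pvCEntry end_pred raw_text k (start_pred.getD k 0))).reverse := by
  intro i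
  induction i with
  | zero => intro nxt res _; simp [pvAltLoop]
  | succ i ih =>
    intro nxt res hinv
    rw [pvAltLoop]
    set nxt' := if i < end_pred.length then nxt.insert (PySem.List.pyGetD end_pred (i : Int) 0) (i : Int) else nxt with hnxt'
    have hinv' : pvInv end_pred nxt' i := by
      by_cases hi : i < end_pred.length
      · rw [hnxt', if_pos hi]; exact pvInv_step_in end_pred nxt i hi hinv
      · rw [hnxt', if_neg hi]; exact pvInv_step_out end_pred nxt i (by omega) hinv
    have hbody : (if i < start_pred.length then
          let t := PySem.List.pyGetD start_pred (i : Int) 0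
          if !(t == 0) && nxt'.contains t then
            res ++ [PySem.Str.slice raw_text (some (i : Int)) (some (nxt'.getD t 0 + 1))]
          else res
        else res)
        = res ++ (pvCEntry end_pred raw_text i (start_pred.getD i 0)).toList := by
      by_cases hi : i < start_pred.length
      · rw [if_pos hi]
        simp only [PySem.List.pyGetD_natCast]
        set t := start_pred.getD i 0 with ht
        by_cases ht0 : t = 0
        · have hcond : (!(t == 0) && nxt'.contains t) = false := by simp [ht0]
          rw [hcond]
          simp [pvCEntry, ht0]
        · cases hf : (end_pred.drop i).findIdx? (fun e => e == t) with
          | none =>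
            have hcon : nxt'.contains t = false := by
              rw [PySem.Dict.contains_eq_isSome_get?, hinv' t, hf]; rfl
            simp [pvCEntry, ht0, hf, hcon]
          | some n =>
            have hcon : nxt'.contains t = true := by
              rw [PySem.Dict.contains_eq_isSome_get?, hinv' t, hf]; rfl
            have hgd : nxt'.getD t 0 = (i : Int) + (n : Int) := by
              rw [PySem.Dict.getD_eq_get?_getD, hinv' t, hf]; rfl
            simp [pvCEntry, ht0, hf, hcon, hgd]
      · rw [if_neg hi]
        have h0 : start_pred.getD i 0 = 0 := List.getD_eq_default _ _ (by omega)
        rw [h0]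
        simp [pvCEntry]
    rw [hbody, ih _ _ hinv', pvRevSucc, List.append_assoc]

lemma pvCEntry_none_of_ge (end_pred : List Int) (raw_text : String) (start_pred : List Int)
    (k : Nat) (hk : start_pred.length ≤ k) :
    pvCEntry end_pred raw_text k (start_pred.getD k 0) = none := by
  rw [List.getD_eq_default _ _ hk]; simp [pvCEntry]

-- B equals the characterisation
lemma pvB_eq (start_pred end_pred : List Int) (raw_text : String) :
    mrc_decode_alt start_pred end_pred raw_text
      = (List.range start_pred.length).filterMap
          (fun k => pvCEntry end_pred raw_text k (start_pred.getD k 0)) := by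
  unfold mrc_decode_alt
  rw [pvAltLoop_snd start_pred end_pred raw_text _ _ _
        (pvInv_top end_pred _ (Nat.le_max_right _ _))]
  rw [List.nil_append, List.reverse_reverse]
  obtain ⟨d, hd⟩ : ∃ d, max start_pred.length end_pred.length = start_pred.length + d :=
    ⟨max start_pred.length end_pred.length - start_pred.length, by omega⟩
  rw [hd, List.range_add, List.filterMap_append, List.filterMap_map]
  have htail : List.filterMap ((fun k => pvCEntry end_pred raw_text k (start_pred.getD k 0)) ∘ fun x => start_pred.length + x) (List.range d) = [] := by
    apply List.filterMap_eq_nil_iff.mpr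
    intro k _
    exact pvCEntry_none_of_ge end_pred raw_text start_pred _ (Nat.le_add_right _ _)
  rw [htail, List.append_nil]

-- ===== VERDICT (by name: the statement is the Claim_ definition above) =====
theorem mrc_decode_spec : Claim_equal_mrc_decode := by
  intro start_pred end_pred raw_text _
  unfold Spec_mrc_decode
  rw [pvA_eq, pvB_eq]
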